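-- pv_equiv track=rewrite | github.com/airtnqls/Shapez2-Analytics-tools | regex_score.py | calculate_specificity_score
-- ===== SOURCE A (Python) =====
-- def calculate_specificity_score(pattern_string: str) -> int:
--     """
--     정규식 패턴의 구체성 점수를 계산합니다.
--     - 리터럴: 4점
--     - 긍정 클래스 [..]: 3점
--     - 부정 클래스 [^..]: 2점
--     - 와일드카드 .: 1점
--     """
--     score = 0
--     i = 0
--     while i < len(pattern_string):
--         char = pattern_string[i]
--
--         if char == '[':
--             # 문자 클래스 ([...]) 처리
--             end_bracket_index = pattern_string.find(']', i)
--             if end_bracket_index != -1: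
--                 # 클래스 내부의 첫 문자가 '^'이면 부정 클래스
--                 if pattern_string[i+1] == '^':
--                     score += 2  # 부정 클래스 점수
--                 else:
--                     score += 3  # 긍정 클래스 점수
--                 i = end_bracket_index + 1
--                 continue
--         elif char == '.':
--             score += 1  # 와일드카드 점수
--         elif char == ':':
--             pass  # 구분자는 점수 없음
--         else:
--             # 그 외 문자는 모두 리터럴로 간주
--             score += 4  # 리터럴 점수
--
--         i += 1
--
--     return score
-- ===== SOURCE B (Python) =====
-- def calculate_specificity_score(pattern_string: str) -> int:
--     # Single left-to-right state machine: no backtracking find() calls.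
--     # r = number of closing brackets not yet scanned; an opening bracket
--     # starts a class iff r > 0.
--     score = 0
--     r = sum(1 for c in pattern_string if c == ']')
--     state = 0  # 0 = outside a class, 1 = just after '[', 2 = inside a class
--     for ch in pattern_string:
--         if state == 0:
--             if ch == '[':
--                 if r > 0:
--                     state = 1
--             elif ch == '.':
--                 score += 1
--             elif ch == ':':
--                 pass
--             else:
--                 score += 4
--         elif state == 1:
--             score += 2 if ch == '^' else 3
--             state = 0 if ch == ']' else 2
--         elif ch == ']':
--             state = 0
--         if ch == ']':
--             r -= 1
--     return score
-- ===== Notes on version B (the rewrite author's own statement) =====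
-- stated objective: faster
-- what changed: Replaces A's while-loop, which calls a forward find for the closing bracket at every opening bracket and jumps past character classes, with a single left-to-right three-state machine pass that pre-counts closing brackets once to decide whether an opening bracket starts a class.
import Mathlib
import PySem

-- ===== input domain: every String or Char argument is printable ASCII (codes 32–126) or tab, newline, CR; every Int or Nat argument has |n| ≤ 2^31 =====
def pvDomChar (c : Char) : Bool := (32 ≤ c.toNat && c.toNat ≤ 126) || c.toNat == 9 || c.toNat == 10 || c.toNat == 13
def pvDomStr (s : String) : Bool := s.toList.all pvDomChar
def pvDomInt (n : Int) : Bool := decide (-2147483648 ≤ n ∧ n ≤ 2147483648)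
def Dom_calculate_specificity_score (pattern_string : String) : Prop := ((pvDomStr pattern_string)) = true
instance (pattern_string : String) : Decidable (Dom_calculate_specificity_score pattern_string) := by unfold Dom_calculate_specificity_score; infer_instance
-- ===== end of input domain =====

-- B replaces A's while-loop with its repeated forward find scans by one left-to-right
-- state-machine pass over the characters, pre-counting the closing brackets once.

-- ===== PORT A =====
-- characterisation of A's forward find call, needed by the port's decreasing_by
lemma pvSingletonPrefix (a : Char) (t : List Char) : [a] <+: t ↔ t.head? = some a := by
  cases t <;> simp [List.cons_prefix_cons, eq_comm]

lemma pvFindSpec (l : List Char) (i : Nat) (hi : i ≤ l.length) :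
    (PySem.Chars.findFrom l [']'] (i : Int) none = -1 ∧ ']' ∉ l.drop i) ∨
    (∃ j : Nat, PySem.Chars.findFrom l [']'] (i : Int) none = (j : Int) ∧ i ≤ j ∧ j < l.length ∧
      l[j]? = some ']' ∧ ∀ m : Nat, i ≤ m → m < j → l[m]? ≠ some ']') := by
  by_cases h : PySem.Chars.findFrom l [']'] (i : Int) none = -1
  · left
    refine ⟨h, fun hm => ?_⟩
    have hinf := (PySem.Chars.findFrom_natCast_eq_neg_one_iff l [']'] i hi).mp h
    obtain ⟨p, q, hpq⟩ := List.append_of_mem hm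
    exact hinf ⟨p, q, by simp [hpq]⟩
  · right
    obtain ⟨h1, h2, h3⟩ := PySem.Chars.findFrom_natCast_spec l [']'] i hi h
    have hget : l[(PySem.Chars.findFrom l [']'] (i : Int) none).toNat]? = some ']' := by
      have := (pvSingletonPrefix ']' _).mp h2
      rwa [List.head?_drop] at this
    refine ⟨(PySem.Chars.findFrom l [']'] (i : Int) none).toNat, by omega, by omega,
      ?_, hget, fun m hm1 hm2 hms => ?_⟩
    · have := List.getElem?_eq_some_iff.mp hget
      exact this.1
    · exact h3 m hm1 hm2 ((pvSingletonPrefix ']' _).mpr (by rwa [List.head?_drop]))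

-- Port of A's while loop; `i = end_bracket_index + 1` uses `.toNat` (the index is proved ≥ 0),
-- and `pattern_string[i+1]` is read with pyGet? (always in range here, since a ']' exists past i).
def pvALoop (l : List Char) (i : Nat) (score : Int) : Int :=
  if h : i < l.length then
    let char := l[i]
    if char = '[' then
      let e := PySem.Chars.findFrom l [']'] (i : Int) none
      if he : e ≠ -1 then
        let score' := if PySem.List.pyGet? l ((i : Int) + 1) = some '^' then score + 2 else score + 3
        pvALoop l (e.toNat + 1) score'
      else
        pvALoop l (i + 1) score
    else if char = '.' then pvALoop l (i + 1) (score + 1)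
    else if char = ':' then pvALoop l (i + 1) score
    else pvALoop l (i + 1) (score + 4)
  else score
termination_by l.length - i
decreasing_by
  · rcases pvFindSpec l i (Nat.le_of_lt h) with ⟨h1, _⟩ | ⟨j, h1, h2, h3, _, _⟩
    · exact absurd h1 he
    · simp only [h1, Int.toNat_natCast]; omega
  all_goals omega

def calculate_specificity_score (pattern_string : String) : Int :=
  pvALoop pattern_string.toList 0 0

-- ===== PORT B =====
-- one step of B's state machine: state 0 = outside a class, 1 = just after '[', 2 = inside a class;
-- r counts the closing brackets not yet scanned
def pvStep (acc : Nat × Int × Int) (ch : Char) : Nat × Int × Int :=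
  let st := acc.1
  let sc := acc.2.1
  let r := acc.2.2
  let p : Nat × Int :=
    if st = 0 then
      if ch = '[' then (if 0 < r then (1, sc) else (0, sc))
      else if ch = '.' then (0, sc + 1)
      else if ch = ':' then (0, sc)
      else (0, sc + 4)
    else if st = 1 then
      (if ch = ']' then 0 else 2, sc + (if ch = '^' then 2 else 3))
    else
      (if ch = ']' then 0 else st, sc)
  (p.1, p.2, if ch = ']' then r - 1 else r)

def calculate_specificity_score_alt (pattern_string : String) : Int :=
  let l := pattern_string.toList
  let r0 : Int := (l.countP (fun c => c == ']') : Int)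
  (l.foldl pvStep (0, 0, r0)).2.1

-- ===== PRECONDITION & SPEC =====
def Spec_calculate_specificity_score (pattern_string : String) (out : Int) : Prop := out = calculate_specificity_score_alt pattern_string
instance (pattern_string : String) (out : Int) : Decidable (Spec_calculate_specificity_score pattern_string out) := by unfold Spec_calculate_specificity_score; infer_instance

-- ===== CLAIM (what is proved, stated in full; the proofs are below) =====
def Claim_equal_calculate_specificity_score : Prop := ∀ (pattern_string : String), Dom_calculate_specificity_score pattern_string → Spec_calculate_specificity_score pattern_string (calculate_specificity_score pattern_string)

-- ===== LEMMAS AND PROOFS =====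
lemma pvRun2 (mid : List Char) (hmid : ']' ∉ mid) : ∀ (rest : List Char) (sc r : Int),
    (mid ++ ']' :: rest).foldl pvStep (2, sc, r) = rest.foldl pvStep (0, sc, r - 1) := by
  induction mid with
  | nil => intro rest sc r; simp [pvStep]
  | cons c t ih =>
    intro rest sc r
    have hc : c ≠ ']' := fun h => hmid (by simp [h])
    simp only [List.cons_append, List.foldl_cons]
    have : pvStep (2, sc, r) c = (2, sc, r) := by simp [pvStep, hc]
    rw [this, ih (fun h => hmid (List.mem_cons_of_mem _ h))]

lemma pvRun1 (mid rest : List Char) (hmid : ']' ∉ mid) (sc r : Int) :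
    (mid ++ ']' :: rest).foldl pvStep (1, sc, r) =
      rest.foldl pvStep
        (0, sc + (if (mid ++ ']' :: rest).head? = some '^' then 2 else 3), r - 1) := by
  cases mid with
  | nil => simp [pvStep]
  | cons c t =>
    have hc : c ≠ ']' := fun h => hmid (by simp [h])
    simp only [List.cons_append, List.foldl_cons, List.head?_cons]
    have : pvStep (1, sc, r) c = (2, sc + (if c = '^' then 2 else 3), r) := by
      simp [pvStep, hc]
    rw [this, pvRun2 t (fun h => hmid (List.mem_cons_of_mem _ h))]
    simp

lemma pvMain (l : List Char) : ∀ n i score, l.length - i = n → i ≤ l.length →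
    pvALoop l i score =
      ((l.drop i).foldl pvStep (0, score, ((l.drop i).countP (fun c => c == ']') : Int))).2.1 := by
  intro n
  induction n using Nat.strong_induction_on with
  | _ n IH =>
    intro i score hn hi
    rw [pvALoop]
    by_cases h : i < l.length
    · rw [dif_pos h]
      have hdrop : l.drop i = l[i] :: l.drop (i + 1) := (List.getElem_cons_drop h).symm
      have hfold : ∀ st : Nat × Int × Int,
          (l.drop i).foldl pvStep st = (l.drop (i + 1)).foldl pvStep (pvStep st l[i]) := by
        intro st
        conv_lhs => rw [hdrop]
        rw [List.foldl_cons]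
      by_cases hbr : l[i] = '['
      · rcases pvFindSpec l i hi with ⟨hf, hnm⟩ | ⟨j, hf, hij, hjl, hgj, hnone⟩
        · -- no closing bracket: the '[' scores nothing on both sides
          simp only [hbr, hf, ne_eq, not_true_eq_false, dite_false, reduceIte]
          have hC : (l.drop i).countP (fun c => c == ']') = 0 :=
            List.countP_eq_zero.mpr (fun c hc => by
              simp only [beq_iff_eq]; rintro rfl; exact hnm hc)
          have hC' : (l.drop (i + 1)).countP (fun c => c == ']') = 0 := by
            rw [hdrop, List.countP_cons] at hC; omega
          have hstep : pvStep (0, score, ((l.drop i).countP (fun c => c == ']') : Int)) l[i]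
              = (0, score, ((l.drop (i + 1)).countP (fun c => c == ']') : Int)) := by
            simp [pvStep, hbr, hC, hC']
          rw [hfold, hstep, ← IH (l.length - (i + 1)) (by omega) (i + 1) score rfl (by omega)]
        · -- a closing bracket at index j: A jumps past it, B's machine walks through it
          have hji : i + 1 ≤ j := by
            rcases Nat.lt_or_ge i j with h' | h'
            · omega
            · have : j = i := by omega
              subst this
              rw [List.getElem?_eq_getElem h, hbr] at hgj
              simp at hgj
          have hne : (j : Int) ≠ -1 := by omega
          simp only [hbr, hf, ne_eq, hne, not_false_eq_true, dite_true, Int.toNat_natCast,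
            reduceIte]
          -- decompose the tail into mid ++ ']' :: rest
          set mid := (l.drop (i + 1)).take (j - (i + 1)) with hmiddef
          have hdec : l.drop (i + 1) = mid ++ ']' :: l.drop (j + 1) := by
            have h1 : mid ++ (l.drop (i + 1)).drop (j - (i + 1)) = l.drop (i + 1) :=
              List.take_append_drop _ _
            have h2 : (l.drop (i + 1)).drop (j - (i + 1)) = l.drop j := by
              rw [List.drop_drop]; congr 1; omega
            have h3 : l.drop j = l[j]'(hjl) :: l.drop (j + 1) :=
              (List.getElem_cons_drop hjl).symm
            have h4 : l[j]'(hjl) = ']' := by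
              rw [List.getElem?_eq_getElem hjl] at hgj; simpa using hgj
            rw [← h1, h2, h3, h4]
          have hmid : ']' ∉ mid := by
            intro hm
            obtain ⟨m, hm1, hm2⟩ := List.mem_iff_getElem.mp hm
            have hml : m < j - (i + 1) := lt_of_lt_of_le hm1 (by simp [hmiddef])
            have : mid[m]'hm1 = l[i + 1 + m]'(by omega) := by
              simp [hmiddef, List.getElem_take, List.getElem_drop]
            exact hnone (i + 1 + m) (by omega) (by omega)
              (by rw [List.getElem?_eq_getElem (by omega)]; rw [this] at hm2; simp [hm2])
          have hCmid : mid.countP (fun c => c == ']') = 0 :=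
            List.countP_eq_zero.mpr (fun c hc => by
              simp only [beq_iff_eq]; rintro rfl; exact hmid hc)
          -- the count over drop i
          have hC : (l.drop i).countP (fun c => c == ']')
              = (l.drop (j + 1)).countP (fun c => c == ']') + 1 := by
            rw [hdrop, hdec, List.countP_cons, List.countP_append, List.countP_cons]
            simp [hbr, hCmid]
          -- head of the tail is what A reads at i+1
          have hhead : PySem.List.pyGet? l ((i : Int) + 1)
              = (mid ++ ']' :: l.drop (j + 1)).head? := by
            have : ((i : Int) + 1) = ((i + 1 : Nat) : Int) := by push_cast; ring
            rw [this, PySem.List.pyGet?_natCast, ← List.head?_drop, hdec]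
          have hpos : (0 : Int) < ((l.drop i).countP (fun c => c == ']') : Int) := by
            rw [hC]; push_cast; omega
          have hstep : pvStep (0, score, ((l.drop i).countP (fun c => c == ']') : Int)) l[i]
              = (1, score, ((l.drop i).countP (fun c => c == ']') : Int)) := by
            simp only [pvStep, hbr, reduceIte, if_pos hpos]
            simp
          rw [hfold, hstep, hdec, pvRun1 _ _ hmid, hhead]
          have hr : ((l.drop i).countP (fun c => c == ']') : Int) - 1
              = ((l.drop (j + 1)).countP (fun c => c == ']') : Int) := by
            rw [hC]; push_cast; ring
          rw [hr, ← IH (l.length - (j + 1)) (by omega) (j + 1)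
            (score + if (mid ++ ']' :: l.drop (j + 1)).head? = some '^' then 2 else 3)
            rfl (by omega)]
          split <;> rfl
      · -- not a '[': both sides score this single character the same way
        have hstep : pvStep (0, score, ((l.drop i).countP (fun c => c == ']') : Int)) l[i]
            = (0, score + (if l[i] = '.' then 1 else if l[i] = ':' then 0 else 4),
               ((l.drop (i + 1)).countP (fun c => c == ']') : Int)) := by
          have hCnt : ((l.drop (i + 1)).countP (fun c => c == ']') : Int)
              = if l[i] = ']' then ((l.drop i).countP (fun c => c == ']') : Int) - 1
                else ((l.drop i).countP (fun c => c == ']') : Int) := by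
            rw [hdrop, List.countP_cons]
            by_cases hc : l[i] = ']' <;> simp [hc]
          by_cases h1 : l[i] = '.'
          · have hne : l[i] ≠ ']' := by rw [h1]; decide
            simp [pvStep, h1, hCnt]
          · by_cases h2 : l[i] = ':'
            · have hne : l[i] ≠ ']' := by rw [h2]; decide
              simp [pvStep, h2, hCnt]
            · by_cases h3 : l[i] = ']' <;> simp [pvStep, hbr, h1, h2, h3, hCnt]
        rw [hfold, hstep,
          ← IH (l.length - (i + 1)) (by omega) (i + 1) _ rfl (by omega)]
        simp only [if_neg hbr]
        by_cases h1 : l[i] = '.' <;> by_cases h2 : l[i] = ':' <;>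
          simp [h1, h2]
    · rw [dif_neg h]
      have : l.drop i = [] := List.drop_eq_nil_of_le (by omega)
      simp [this]

-- ===== VERDICT (by name: the statement is the Claim_ definition above) =====
theorem calculate_specificity_score_spec : Claim_equal_calculate_specificity_score := by
  intro s _
  unfold Spec_calculate_specificity_score calculate_specificity_score calculate_specificity_score_alt
  simpa using pvMain s.toList (s.toList.length) 0 0 (by omega) (by omega)
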